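-- pv_equiv track=rewrite | github.com/bprzybysz/graphmcp | concrete/db_decommission/validation_checks.py | _generate_integrity_recommendations
-- ===== SOURCE A (Python) =====
-- from typing import Dict, List, Any, Optional
--
-- def _generate_integrity_recommendations(
--     critical_files: List[Dict[str, Any]],
--     risk_level: str
-- ) -> List[str]:
--     """
--     Generate recommendations based on service integrity assessment.
--
--     Args:
--         critical_files: List of critical file information
--         risk_level: Assessed risk level
--
--     Returns:
--         List of recommendation strings
--     """
--     recommendations = []
--
--     if risk_level == "HIGH":
--         recommendations.extend([
--             "Perform thorough testing before deployment",
--             "Create rollback plan with database restore procedures",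
--             "Coordinate with application teams for deployment window",
--             "Monitor application logs closely after deployment"
--         ])
--     elif risk_level == "MEDIUM":
--         recommendations.extend([
--             "Review critical file changes with application team",
--             "Test application functionality in staging environment",
--             "Prepare monitoring alerts for potential issues"
--         ])
--     elif risk_level == "LOW":
--         recommendations.extend([
--             "Standard deployment procedures should be sufficient",
--             "Monitor application health metrics after deployment"
--         ])
--
--     # Add file-type specific recommendations
--     file_types = {f["type"] for f in critical_files}
--
--     if "sql" in file_types:
--         recommendations.append("Review database schema changes with DBA team")
--
--     if "infrastructure" in file_types:
--         recommendations.append("Validate infrastructure configuration changes")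
--
--     if "config" in file_types:
--         recommendations.append("Update configuration management documentation")
--
--     return recommendations
-- ===== SOURCE B (Python) =====
-- from typing import Dict, List, Any
--
-- # One unified, ordered master table of every possible recommendation, each tagged
-- # with the single condition that selects it: ("risk", level) or ("type", file_type).
-- _MASTER = [
--     ("risk", "HIGH", "Perform thorough testing before deployment"),
--     ("risk", "HIGH", "Create rollback plan with database restore procedures"),
--     ("risk", "HIGH", "Coordinate with application teams for deployment window"),
--     ("risk", "HIGH", "Monitor application logs closely after deployment"),
--     ("risk", "MEDIUM", "Review critical file changes with application team"),
--     ("risk", "MEDIUM", "Test application functionality in staging environment"),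
--     ("risk", "MEDIUM", "Prepare monitoring alerts for potential issues"),
--     ("risk", "LOW", "Standard deployment procedures should be sufficient"),
--     ("risk", "LOW", "Monitor application health metrics after deployment"),
--     ("type", "sql", "Review database schema changes with DBA team"),
--     ("type", "infrastructure", "Validate infrastructure configuration changes"),
--     ("type", "config", "Update configuration management documentation"),
-- ]
--
-- def _generate_integrity_recommendations(
--     critical_files: List[Dict[str, Any]],
--     risk_level: str
-- ) -> List[str]:
--     file_types = {f["type"] for f in critical_files}
--     return [msg for kind, key, msg in _MASTER
--             if (key == risk_level if kind == "risk" else key in file_types)]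
-- ===== Notes on version B (the rewrite author's own statement) =====
-- stated objective: idiomatic
-- what changed: Replaces A's branch structure (risk-level if/elif chain plus three independent type if-blocks appending to an accumulator) with one unified ordered master table of tagged candidate recommendations selected by a single filtering pass (a comprehension with a per-entry predicate).
import Mathlib
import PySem

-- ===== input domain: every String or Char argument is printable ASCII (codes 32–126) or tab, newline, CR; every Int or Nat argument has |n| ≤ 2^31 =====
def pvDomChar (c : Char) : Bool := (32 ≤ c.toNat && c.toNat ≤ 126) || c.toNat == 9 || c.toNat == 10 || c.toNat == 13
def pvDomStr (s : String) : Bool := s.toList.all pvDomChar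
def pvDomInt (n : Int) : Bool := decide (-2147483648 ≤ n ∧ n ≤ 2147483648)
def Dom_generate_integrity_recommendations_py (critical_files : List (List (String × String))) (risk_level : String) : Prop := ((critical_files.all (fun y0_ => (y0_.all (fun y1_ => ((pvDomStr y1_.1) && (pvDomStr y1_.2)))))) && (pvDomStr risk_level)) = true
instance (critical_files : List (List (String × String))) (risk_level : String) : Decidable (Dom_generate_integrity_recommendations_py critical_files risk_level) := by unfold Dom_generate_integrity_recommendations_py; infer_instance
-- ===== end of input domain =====

-- B replaces A's branch structure (risk if/elif chain + three type if-blocks with an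
-- accumulator) by one unified ordered master table of tagged candidate recommendations
-- selected in a single filtering pass; same output, idiomatic restructuring (no speed claim).


-- ===== PORT A =====
-- Python dict lookup on an insertion-ordered assoc list = first match; exact (dict keys are unique).
def pvDictGet? (d : List (String × String)) (k : String) : Option String :=
  match d with
  | [] => none
  | (k', v) :: rest => if k == k' then some v else pvDictGet? rest k

-- f["type"] in the set comprehension is ported via pvDictGet?; Pre_ excludes the KeyError case
-- (a file dict without a "type" key), so every collected element is 'some t' exactly as in Python.
def generate_integrity_recommendations_py (critical_files : List (List (String × String))) (risk_level : String) : List String :=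
  let recommendations : List String := []
  let recommendations :=
    if risk_level == "HIGH" then
      recommendations ++ [
        "Perform thorough testing before deployment",
        "Create rollback plan with database restore procedures",
        "Coordinate with application teams for deployment window",
        "Monitor application logs closely after deployment"]
    else if risk_level == "MEDIUM" then
      recommendations ++ [
        "Review critical file changes with application team",
        "Test application functionality in staging environment",
        "Prepare monitoring alerts for potential issues"]
    else if risk_level == "LOW" then
      recommendations ++ [
        "Standard deployment procedures should be sufficient",
        "Monitor application health metrics after deployment"]
    else recommendations
  let file_types : PySem.Set (Option String) :=
    PySem.Set.ofList (critical_files.map (fun f => pvDictGet? f "type"))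
  let recommendations :=
    if PySem.Set.contains file_types (some "sql") then
      recommendations ++ ["Review database schema changes with DBA team"]
    else recommendations
  let recommendations :=
    if PySem.Set.contains file_types (some "infrastructure") then
      recommendations ++ ["Validate infrastructure configuration changes"]
    else recommendations
  let recommendations :=
    if PySem.Set.contains file_types (some "config") then
      recommendations ++ ["Update configuration management documentation"]
    else recommendations
  recommendations

-- ===== PORT B =====
-- the unified master table: (kind, key, message), kind "risk" selected by key == risk_level,
-- kind "type" selected by key ∈ file_types
def pvMaster : List (String × String × String) :=
  [("risk", "HIGH", "Perform thorough testing before deployment"),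
   ("risk", "HIGH", "Create rollback plan with database restore procedures"),
   ("risk", "HIGH", "Coordinate with application teams for deployment window"),
   ("risk", "HIGH", "Monitor application logs closely after deployment"),
   ("risk", "MEDIUM", "Review critical file changes with application team"),
   ("risk", "MEDIUM", "Test application functionality in staging environment"),
   ("risk", "MEDIUM", "Prepare monitoring alerts for potential issues"),
   ("risk", "LOW", "Standard deployment procedures should be sufficient"),
   ("risk", "LOW", "Monitor application health metrics after deployment"),
   ("type", "sql", "Review database schema changes with DBA team"),
   ("type", "infrastructure", "Validate infrastructure configuration changes"),
   ("type", "config", "Update configuration management documentation")]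

def generate_integrity_recommendations_py_alt (critical_files : List (List (String × String))) (risk_level : String) : List String :=
  let file_types : PySem.Set (Option String) :=
    PySem.Set.ofList (critical_files.map (fun f => pvDictGet? f "type"))
  (pvMaster.filter (fun e =>
      if e.1 == "risk" then e.2.1 == risk_level
      else PySem.Set.contains file_types (some e.2.1))).map (fun e => e.2.2)

-- ===== PRECONDITION & SPEC =====
-- Pre_ excludes exactly the inputs where Python A raises KeyError: a file dict lacking the "type" key.
def Pre_generate_integrity_recommendations_py (critical_files : List (List (String × String))) (risk_level : String) : Prop :=
  ∀ f ∈ critical_files, "type" ∈ f.map Prod.fst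
instance (critical_files : List (List (String × String))) (risk_level : String) : Decidable (Pre_generate_integrity_recommendations_py critical_files risk_level) := by unfold Pre_generate_integrity_recommendations_py; infer_instance
def pvWitness_generate_integrity_recommendations_py : (List (List (String × String))) × String :=
  ([[("type", "sql")], [("type", "config"), ("path", "a.cfg")]], "LOW")
def Spec_generate_integrity_recommendations_py (critical_files : List (List (String × String))) (risk_level : String) (out : List String) : Prop := out = generate_integrity_recommendations_py_alt critical_files risk_level
instance (critical_files : List (List (String × String))) (risk_level : String) (out : List String) : Decidable (Spec_generate_integrity_recommendations_py critical_files risk_level out) := by unfold Spec_generate_integrity_recommendations_py; infer_instance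

-- ===== CLAIM (what is proved, stated in full; the proofs are below) =====
def Claim_equal_generate_integrity_recommendations_py : Prop := ∀ (critical_files : List (List (String × String))) (risk_level : String), Dom_generate_integrity_recommendations_py critical_files risk_level → Pre_generate_integrity_recommendations_py critical_files risk_level → Spec_generate_integrity_recommendations_py critical_files risk_level (generate_integrity_recommendations_py critical_files risk_level)

-- ===== LEMMAS AND PROOFS =====

-- ===== VERDICT (by name: the statement is the Claim_ definition above) =====
set_option maxHeartbeats 2000000 in
set_option maxRecDepth 4096 in
theorem generate_integrity_recommendations_py_spec : Claim_equal_generate_integrity_recommendations_py := by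
  intro cf rl hD hP
  clear hD hP
  unfold Spec_generate_integrity_recommendations_py
  unfold generate_integrity_recommendations_py generate_integrity_recommendations_py_alt pvMaster
  set S := PySem.Set.ofList (cf.map (fun f => pvDictGet? f "type")) with hS
  clear hS
  by_cases h1 : rl = "HIGH"
  · subst h1
    by_cases c1 : (some "sql" : Option String) ∈ S <;>
      by_cases c2 : (some "infrastructure" : Option String) ∈ S <;>
      by_cases c3 : (some "config" : Option String) ∈ S <;>
        simp [c1, c2, c3]
  · by_cases h2 : rl = "MEDIUM"
    · subst h2
      by_cases c1 : (some "sql" : Option String) ∈ S <;>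
        by_cases c2 : (some "infrastructure" : Option String) ∈ S <;>
        by_cases c3 : (some "config" : Option String) ∈ S <;>
          simp [c1, c2, c3]
    · by_cases h3 : rl = "LOW"
      · subst h3
        by_cases c1 : (some "sql" : Option String) ∈ S <;>
          by_cases c2 : (some "infrastructure" : Option String) ∈ S <;>
          by_cases c3 : (some "config" : Option String) ∈ S <;>
            simp [c1, c2, c3]
      · have a1 : (rl == "HIGH") = false := beq_eq_false_iff_ne.mpr h1
        have a2 : (rl == "MEDIUM") = false := beq_eq_false_iff_ne.mpr h2
        have a3 : (rl == "LOW") = false := beq_eq_false_iff_ne.mpr h3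
        have b1 : (("HIGH" : String) == rl) = false := beq_eq_false_iff_ne.mpr (Ne.symm h1)
        have b2 : (("MEDIUM" : String) == rl) = false := beq_eq_false_iff_ne.mpr (Ne.symm h2)
        have b3 : (("LOW" : String) == rl) = false := beq_eq_false_iff_ne.mpr (Ne.symm h3)
        by_cases c1 : (some "sql" : Option String) ∈ S <;>
          by_cases c2 : (some "infrastructure" : Option String) ∈ S <;>
          by_cases c3 : (some "config" : Option String) ∈ S <;>
            simp [a1, a2, a3, b1, b2, b3, c1, c2, c3]
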